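/- GENERATED by tools/from_farm_form.py from prooffarm-gif/accepted/DGifGetExtension.E/Proof.lean (a worked proof of the farm's unit `DGifGetExtension.E`,
   accepted by the verdict) — do not edit. -/
import Gif.Spec.Units.DGifGetExtension_E
import Gif.Spec.AllSegs

open X86 X86.User Asan ProgX.Base ProgX.Base.Spec Gif.Spec

set_option maxRecDepth 4000
set_option maxHeartbeats 4000000

/-!
  `DGifGetExtension.E` (0x109afb … the `ret` at 0x109b15, 9 instructions; dgif_lib.c:591): THE EPILOGUE of the protected function
  `DGifGetExtension`, after the recipe of farm.gif/worked/DGifGetWord.E (lemmas: Gif/Spec/FrameCarry.lean §1, §2, §4). The blocks: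
    1. the prelude: the entry assertion `Done` as walker facts; the shadow index register `rbp` as a word VARIABLE `b` with bounds;
    2. the walk to the `ret` (the five pops and the return address are read through the shadow store by the walker itself);
    3. `stores1_index`: `hmem : s.mem = storesMem v.mem (base / 8) F.epilogue`;
    4. `after_epilogue` (`HeapInv` for the callers' frames, `GifOK`, `rem`), `epilogue_same` (`Returned.same`), `rd_storesMem`;
       the result `mov eax, r12d` through `epi_zext_small`;
    5. `Returned`, field by field.
-/

namespace Gif.Spec.DGifGetExtension_E

/-- `mov eax, r12d` of a register that holds a small number (the result, 0 or 1): the zero-extension is the number itself. -/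
theorem epi_zext_small (z : Word) (h : z.toNat < 2 ^ 32) : (Word.ofBV (Word.part .w32 z)).toNat = z.toNat := by
  have hz : UInt64.ofNat z.toNat = z := UInt64.ofNat_toNat
  have hc := cnt32_zext z.toNat h
  rw [hz] at hc
  rw [hc]

end Gif.Spec.DGifGetExtension_E

/-- The epilogue of `DGifGetExtension` takes `Done` at 0x109afb to `Returned`. -/
theorem Gif.Spec.Proved.DGifGetExtension_E_ok : Gif.Spec.DGifGetExtension_E.Statement := by
  intro Lay hLay μ hμ u₀ hcode H rest frames F R e ret v hat
  -- 1. THE PRELUDE (0x109afb, dgif_lib.c:570): the entry assertion `Done` = `Body` + the result in `r12` + the post's clause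
  obtain ⟨hbody, hres, hok1⟩ := hat
  have he := hbody.entry
  v_entry he
  obtain ⟨henv, hrdi, hout1, hout2, hdisj⟩ := hbody.pre
  -- what the walker reads of a segment's entry state: rip, rsp (as `c_rsp`), the registers kept, the text, DF / MXCSR
  have w_rip := hbody.rip
  have c_rsp : v.reg .rsp = e.reg .rsp - 104 := hbody.rsp
  have w_kept : RegsKept [.rsp] v v := RegsKept.refl _ _
  have w_eq : Mem.EqOn ProgX.Base.L.textLo ProgX.Base.L.textHi u₀.mem v.mem := ProgX.Base.conv_code_eqOn hbody.code
  have hdf := (show abiInv _ from hbody.abi).1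
  have hmx := (show abiInv _ from hbody.abi).2
  have hsse := ProgX.Base.sseOK_of_abiInv hbody.abi
  -- the slots the five pops and the `ret` read
  have k_r14 : v.mem.readLE (e.reg .rsp - 8) 8 = (e.reg .r14).toNat := hbody.slot_r14
  have k_r13 : v.mem.readLE (e.reg .rsp - 16) 8 = (e.reg .r13).toNat := hbody.slot_r13
  have k_r12 : v.mem.readLE (e.reg .rsp - 24) 8 = (e.reg .r12).toNat := hbody.slot_r12
  have k_rbp : v.mem.readLE (e.reg .rsp - 32) 8 = (e.reg .rbp).toNat := hbody.slot_rbp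
  have k_rbx : v.mem.readLE (e.reg .rsp - 40) 8 = (e.reg .rbx).toNat := hbody.slot_rbx
  have k_ra : UInt64.ofNat (v.mem.readLE (e.reg .rsp) 8) = ret := hbody.slot_ra
  -- THE SHADOW INDEX REGISTER `rbp` AS A VARIABLE `b` WITH BOUNDS: no `>>> 3` is in the walk's context
  have e104 : (e.reg .rsp - 104).toNat = (e.reg .rsp).toNat - 104 := by u_omega
  obtain ⟨b, hb⟩ : ∃ b : Word, b = (e.reg .rsp - 104) >>> 3 := ⟨_, rfl⟩
  have hbn : b.toNat = ((e.reg .rsp).toNat - 104) / 8 := by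
    rw [hb, Asan.toNat_shr3, e104]
  have hb1 : 0xE0000 ≤ b.toNat := by omega
  have hb2 : b.toNat + 8 ≤ 0x100000 := by omega
  have c_rbp : v.reg .rbp = b := by
    rw [hb]
    exact hbody.rbp
  clear hb
  -- the result register `r12` as a variable (`mov eax, r12d` reads it)
  obtain ⟨z, c_r12⟩ : ∃ z : Word, v.reg .r12 = z := ⟨_, rfl⟩
  -- 2. THE WALK, to the `ret` at 0x109b15 (dgif_lib.c:591): no side goal is left
  u_walk hcode [hμ.vendor] span [ProgX.Base.L.textLo, ProgX.Base.L.textHi] side (v_side)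
  -- 3. the epilogue's store as the layout's `storesMem`
  have hepi : Gif.Frames.DGifGetExtension.epilogue = [⟨0, 8, 0⟩] := rfl
  have hmem : s_109b15.mem = storesMem v.mem (((e.reg .rsp).toNat - 104) / 8) Gif.Frames.DGifGetExtension.epilogue := by
    rw [hepi, w_mem, ← hbn]
    exact stores1_index v.mem b 12582912 0 8 0 (by omega) (by decide) (by decide)
  have hin : ∀ s, s ∈ Gif.Frames.DGifGetExtension.epilogue → s.idx + s.width ≤ 8 := by decide
  clear w_mem
  -- 4. the environment behind the epilogue
  obtain ⟨hinv2, hok2, hrem2⟩ := after_epilogue (top := (e.reg .rsp).toNat) (ro := 104) (Fl := Gif.Frames.DGifGetExtension) rfl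
    hbody.inv henv.ctx hbody.ok he_align he_top henv.heap.inv.frames_above
  have hsame2 := epilogue_same (top := (e.reg .rsp).toNat) (ro := 104) (ro' := 40) (Fl := Gif.Frames.DGifGetExtension) rfl rfl
    henv.heap.inv hbody.inv he_align hbody.same
  rw [← hmem] at hinv2 hok2 hrem2 hsame2
  -- what the post reads over the shadow store: `*ExtCode`, `*Extension` (stack addresses), `pv.Buf[0]`; the result register
  have hpw := hbody.ok.pv_where henv.heap.inv.heap henv.heap.base
  have hlow1 := hout1.low
  have hlow2 := hout2.low
  have hrd1 : rd s_109b15.mem (e.reg .rsi).toNat 4 = rd v.mem (e.reg .rsi).toNat 4 := by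
    rw [hmem]
    exact rd_storesMem v.mem _ 8 _ hin (by omega) _ _ (by omega)
  have hrd2 : rd s_109b15.mem (e.reg .rdx).toNat 8 = rd v.mem (e.reg .rdx).toNat 8 := by
    rw [hmem]
    exact rd_storesMem v.mem _ 8 _ hin (by omega) _ _ (by omega)
  have hrd3 : rd s_109b15.mem (F.pv + 88) 1 = rd v.mem (F.pv + 88) 1 := by
    rw [hmem]
    exact rd_storesMem v.mem _ 8 _ hin (by omega) _ _ (by omega)
  -- `mov eax, r12d`: the result (0 or 1) is its own zero-extension
  have hz32 : z.toNat < 2 ^ 32 := by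
    rw [← c_r12]
    omega
  have e_rax : (s_109b15.reg .rax).toNat = (v.reg .r12).toNat := by
    rw [w_rax, c_r12]
    exact Gif.Spec.DGifGetExtension_E.epi_zext_small z hz32
  -- 5. `Returned`, field by field
  refine ReachVia.done ?_
  refine X86.User.Returned.mk w_rip w_rsp ?saved ?same (ProgX.Base.conv_code_in w_eq) ?abi ?post
  case saved =>
    -- the popped registers are the walker's facts; `r15` was never touched: `Body.r15`
    intro r hr
    cases r <;> first
      | exact absurd hr (by decide)
      | (with_reducible assumption)
      | exact (w_kept _ rfl).trans hbody.r15
  case same =>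
    simp only [X86.User.Spec.footprint, vspec]
    exact hsame2
  case abi =>
    -- DF and MXCSR by hand (`v_inv` is slow behind a walk with shadow stores)
    refine ProgX.Base.abiInv_of ?_ ?_
    · rw [w_flags]
      simp only [X86.User.df_setStatus]
      exact hdf
    · rw [w_mxcsr]
      exact hmx
  case post =>
    -- `Back` (the environment, the reader did not go back), the result, the clause of `Done`
    refine ⟨⟨hinv2, hok2, ?_⟩, ?_, ?_⟩
    · rw [hrem2]
      exact hbody.rem
    · unfold IsBool
      rw [e_rax]
      exact hres
    · rw [e_rax, hrd1, hrd2, hrd3, hrem2]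
      exact hok1
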